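-- pv_equiv track=rewrite | github.com/namnetes/vlm | vlm.py | determine_stubs
-- ===== SOURCE A (Python) =====
-- from typing import Optional, Tuple, List, Union, Dict, Set
--
-- def determine_stubs(csect_name: str) -> Dict[str, bool]:
--     """
--     Détermine si le nom de la CSECT correspond à un STUB CICS, DB2 ou WMQ.
--
--     Cette fonction vérifie si le nom de la CSECT fourni correspond à un
--     STUB CICS, DB2 ou WMQ. Elle retourne un dictionnaire indiquant
--     la présence de chaque type de STUB.
--
--     Args:
--         csect_name (str): Nom de la section à vérifier.
--
--     Returns:
--         Dict[str, bool]: Dictionnaire avec des indicateurs pour CICS, DB2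
--         et WMQ.
--
--     Remarques:
--     Pour ce qui concerne CICS et WMQ, le terme "stub" est tout à fait
--     approprié. En revanche, pour DB2, il serait plus précis de parler d’un
--     module d’interface. Que les puristes me pardonnent cette simplification.
--     """
--     # Dictionnaire des STUBS avec des ensembles pour chaque type de STUB
--     STUBS = {
--         "CICS": {"DFHECI"},
--         "DB2": {"DSNCLI", "DSNELI", "DSNULI"},
--         "WMQ": {
--             "CSQBSTUB",
--             "CSQBRRSI",
--             "CSQBRSTB",
--             "CSQCSTUB",
--             "CSQQSTUB",
--             "CSQXSTUB",
--             "CSQASTUB",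
--         },
--     }
--
--     # Initialisation du dictionnaire de résultats avec des valeurs booléennes
--     return {
--         "CICS": csect_name in STUBS["CICS"],
--         "DB2": csect_name in STUBS["DB2"],
--         "WMQ": csect_name in STUBS["WMQ"],
--     }
--
--     # Analyse de la compréhension de dictionnaire utilisée dans le return :
--     #
--     # Étape 1 : STUBS.items() retourne les paires clé-valeur de STUBS
--     # - Chaque paire contient :
--     #   - Une clé (par ex. : "CICS", "DB2", "WMQ").
--     #   - Un ensemble (set) contenant les modules associés (par ex. :
--     #     {"DFHECI"}, {"DSNCLI", "DSNELI", "DSNULI"}, etc.).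
--     #
--     # Étape 2 : La boucle for key, modules in STUBS.items()
--     # - Cette boucle parcourt chaque paire clé-valeur dans STUBS :
--     #   - `key` correspond à la clé (par ex. : "CICS").
--     #   - `modules` correspond à l'ensemble des modules associés à cette clé.
--     #
--     # Étape 3 : La vérification csect_name in modules
--     # - Pour chaque clé, on vérifie si la variable `csect_name` (une chaîne
--     #   de caractères) appartient à l'ensemble `modules`.
--     # - Résultat :
--     #   - Si `csect_name` est dans `modules`, le résultat est `True`.
--     #   - Sinon, le résultat est `False`.
--     #
--     # Étape 4 : Création du dictionnaire de sortie
--     # - Pour chaque clé, on associe le résultat de la vérification comme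
--     #   valeur :
--     #   Exemple avec csect_name = "DFHECI" :
--     #   {
--     #     "CICS": True,  # "DFHECI" est dans l'ensemble associé à "CICS".
--     #     "DB2": False,  # "DFHECI" n'est pas dans l'ensemble associé à "DB2".
--     #     "WMQ": False,  # "DFHECI" n'est pas dans l'ensemble associé à "WMQ".
--     #   }
--     return {key: csect_name in modules for key, modules in STUBS.items()}
-- ===== SOURCE B (Python) =====
-- # B: classify by string structure (a decision tree of prefix/suffix/char tests)
-- # instead of membership in stub-name tables.
-- def determine_stubs(csect_name: str):
--     cics = db2 = wmq = False
--     n = csect_name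
--     if n == "DFHECI":
--         cics = True
--     elif len(n) == 6 and n.startswith("DSN") and n.endswith("LI") and n[3] in "CEU":
--         db2 = True
--     elif n.startswith("CSQ") and (
--         (len(n) == 8 and n.endswith("STUB") and n[3] in "ABCQX")
--         or n == "CSQBRRSI" or n == "CSQBRSTB"
--     ):
--         wmq = True
--     return {"CICS": cics, "DB2": db2, "WMQ": wmq}
-- ===== Notes on version B (the rewrite author's own statement) =====
-- stated objective: alternative
-- what changed: Replaced table membership (three stub-name sets) by a decision tree that classifies the name from its structure: an exact CICS test, a DSN?LI prefix/suffix/char pattern for DB2, and a CSQ prefix plus CSQ?STUB pattern or two exact names for WMQ.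
import Mathlib
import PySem

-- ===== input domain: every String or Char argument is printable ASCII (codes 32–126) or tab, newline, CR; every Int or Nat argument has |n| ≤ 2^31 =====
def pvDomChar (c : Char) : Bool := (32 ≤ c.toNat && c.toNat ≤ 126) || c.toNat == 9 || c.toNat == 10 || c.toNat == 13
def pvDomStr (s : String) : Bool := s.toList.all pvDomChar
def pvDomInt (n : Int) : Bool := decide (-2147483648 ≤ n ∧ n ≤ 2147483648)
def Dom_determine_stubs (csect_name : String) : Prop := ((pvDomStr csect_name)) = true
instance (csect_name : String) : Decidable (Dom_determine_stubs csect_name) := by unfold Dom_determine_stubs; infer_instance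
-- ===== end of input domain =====

-- B replaces table membership by a decision tree of prefix/suffix/character tests; same value, no speed claim.
-- ===== PORT A =====
def determine_stubs (csect_name : String) : List (String × Bool) :=
  let stubs : PySem.Dict String (PySem.Set String) := PySem.Dict.ofList
    [("CICS", PySem.Set.ofList ["DFHECI"]),
     ("DB2", PySem.Set.ofList ["DSNCLI", "DSNELI", "DSNULI"]),
     ("WMQ", PySem.Set.ofList ["CSQBSTUB", "CSQBRRSI", "CSQBRSTB", "CSQCSTUB",
                               "CSQQSTUB", "CSQXSTUB", "CSQASTUB"])]
  [("CICS", PySem.Set.contains (stubs.getD "CICS" []) csect_name),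
   ("DB2",  PySem.Set.contains (stubs.getD "DB2" []) csect_name),
   ("WMQ",  PySem.Set.contains (stubs.getD "WMQ" []) csect_name)]

-- ===== PORT B =====
-- Python's short-circuit `and` only reads n[3] after the length test succeeded, so the
-- `none` arm of the pyGet? match is unreachable; `n[3] in "CEU"` (a 1-char string in a
-- string) is exactly character membership, ported as List.contains on the code points.
def determine_stubs_alt (csect_name : String) : List (String × Bool) :=
  let n := csect_name
  let flags : Bool × Bool × Bool :=
    if n == "DFHECI" then (true, false, false)
    else if PySem.Str.len n == 6 && PySem.Str.startswith n "DSN" && PySem.Str.endswith n "LI" &&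
            (match PySem.Str.pyGet? n 3 with | some c => "CEU".toList.contains c | none => false) then
      (false, true, false)
    else if PySem.Str.startswith n "CSQ" &&
            ((PySem.Str.len n == 8 && PySem.Str.endswith n "STUB" &&
              (match PySem.Str.pyGet? n 3 with | some c => "ABCQX".toList.contains c | none => false))
             || n == "CSQBRRSI" || n == "CSQBRSTB") then
      (false, false, true)
    else (false, false, false)
  [("CICS", flags.1), ("DB2", flags.2.1), ("WMQ", flags.2.2)]

-- ===== PRECONDITION & SPEC =====
def Spec_determine_stubs (csect_name : String) (out : List (String × Bool)) : Prop := out = determine_stubs_alt csect_name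
instance (csect_name : String) (out : List (String × Bool)) : Decidable (Spec_determine_stubs csect_name out) := by unfold Spec_determine_stubs; infer_instance

-- ===== CLAIM (what is proved, stated in full; the proofs are below) =====
def Claim_equal_determine_stubs : Prop := ∀ (csect_name : String), Dom_determine_stubs csect_name → Spec_determine_stubs csect_name (determine_stubs csect_name)

-- ===== LEMMAS AND PROOFS =====

-- If s is none of the three DB2 stub names, B's DSN?LI pattern test is false.
set_option maxHeartbeats 1000000 in
theorem db2_pattern_false (s : String) (h1 : s ≠ "DSNCLI") (h2 : s ≠ "DSNELI")
    (h3 : s ≠ "DSNULI") :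
    (PySem.Str.len s == 6 && PySem.Str.startswith s "DSN" && PySem.Str.endswith s "LI" &&
     (match PySem.Str.pyGet? s 3 with | some c => "CEU".toList.contains c | none => false)) = false := by
  have g1 : s.toList ≠ "DSNCLI".toList := fun hc => h1 (String.toList_inj.mp hc)
  have g2 : s.toList ≠ "DSNELI".toList := fun hc => h2 (String.toList_inj.mp hc)
  have g3 : s.toList ≠ "DSNULI".toList := fun hc => h3 (String.toList_inj.mp hc)
  simp only [PySem.Str.len, PySem.Str.startswith, PySem.Str.endswith, PySem.Str.pyGet?]
  clear h1 h2 h3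
  generalize hl : s.toList = l at *
  clear hl s
  rcases l with _|⟨a,l⟩; · simp
  rcases l with _|⟨b,l⟩; · simp
  rcases l with _|⟨c,l⟩; · simp
  rcases l with _|⟨d,l⟩; · simp
  rcases l with _|⟨e,l⟩; · simp
  rcases l with _|⟨f,l⟩; · simp
  rcases l with _|⟨g,l⟩
  · simp [PySem.Chars.startswith, PySem.Chars.endswith, List.isPrefixOf, List.isSuffixOf,
      PySem.Chars.pyGet?, PySem.List.pyGet?, PySem.List.pyIdx?]
    simp at g1 g2 g3
    intro hD hS hN hI hL
    refine ⟨?_, ?_, ?_⟩ <;> intro hd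
    · exact g1 hD.symm hS.symm hN.symm hd hL.symm hI.symm
    · exact g2 hD.symm hS.symm hN.symm hd hL.symm hI.symm
    · exact g3 hD.symm hS.symm hN.symm hd hL.symm hI.symm
  · simp
    omega

-- If s is none of the seven WMQ stub names, B's whole WMQ branch condition is false.
set_option maxHeartbeats 1000000 in
theorem wmq_pattern_false (s : String) (h1 : s ≠ "CSQBSTUB") (h2 : s ≠ "CSQCSTUB")
    (h3 : s ≠ "CSQQSTUB") (h4 : s ≠ "CSQXSTUB") (h5 : s ≠ "CSQASTUB")
    (h6 : s ≠ "CSQBRRSI") (h7 : s ≠ "CSQBRSTB") :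
    (PySem.Str.startswith s "CSQ" &&
     ((PySem.Str.len s == 8 && PySem.Str.endswith s "STUB" &&
       (match PySem.Str.pyGet? s 3 with | some c => "ABCQX".toList.contains c | none => false))
      || s == "CSQBRRSI" || s == "CSQBRSTB")) = false := by
  have e6 : (s == "CSQBRRSI") = false := by simpa using h6
  have e7 : (s == "CSQBRSTB") = false := by simpa using h7
  rw [e6, e7]
  have g1 : s.toList ≠ "CSQBSTUB".toList := fun hc => h1 (String.toList_inj.mp hc)
  have g2 : s.toList ≠ "CSQCSTUB".toList := fun hc => h2 (String.toList_inj.mp hc)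
  have g3 : s.toList ≠ "CSQQSTUB".toList := fun hc => h3 (String.toList_inj.mp hc)
  have g4 : s.toList ≠ "CSQXSTUB".toList := fun hc => h4 (String.toList_inj.mp hc)
  have g5 : s.toList ≠ "CSQASTUB".toList := fun hc => h5 (String.toList_inj.mp hc)
  simp only [PySem.Str.len, PySem.Str.startswith, PySem.Str.endswith, PySem.Str.pyGet?]
  clear h1 h2 h3 h4 h5 h6 h7 e6 e7
  generalize hl : s.toList = l at *
  clear hl s
  rcases l with _|⟨a,l⟩; · simp
  rcases l with _|⟨b,l⟩; · simp
  rcases l with _|⟨c,l⟩; · simp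
  rcases l with _|⟨d,l⟩; · simp
  rcases l with _|⟨e,l⟩; · simp
  rcases l with _|⟨f,l⟩; · simp
  rcases l with _|⟨g,l⟩; · simp
  rcases l with _|⟨i,l⟩; · simp
  rcases l with _|⟨j,l⟩
  · simp [PySem.Chars.startswith, PySem.Chars.endswith, List.isPrefixOf, List.isSuffixOf,
      PySem.Chars.pyGet?, PySem.List.pyGet?, PySem.List.pyIdx?]
    simp at g1 g2 g3 g4 g5
    intro hC hS hQ hB hU hT hE
    refine ⟨?_, ?_, ?_, ?_, ?_⟩ <;> intro hd
    · exact g5 hC.symm hS.symm hQ.symm hd hE.symm hT.symm hU.symm hB.symm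
    · exact g1 hC.symm hS.symm hQ.symm hd hE.symm hT.symm hU.symm hB.symm
    · exact g2 hC.symm hS.symm hQ.symm hd hE.symm hT.symm hU.symm hB.symm
    · exact g3 hC.symm hS.symm hQ.symm hd hE.symm hT.symm hU.symm hB.symm
    · exact g4 hC.symm hS.symm hQ.symm hd hE.symm hT.symm hU.symm hB.symm
  · simp
    omega

-- ===== VERDICT (by name: the statement is the Claim_ definition above) =====
set_option maxHeartbeats 1000000 in
theorem determine_stubs_spec : Claim_equal_determine_stubs := by
  intro s _
  unfold Spec_determine_stubs
  by_cases h1 : s = "DFHECI"; · subst h1; decide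
  by_cases h2 : s = "DSNCLI"; · subst h2; decide
  by_cases h3 : s = "DSNELI"; · subst h3; decide
  by_cases h4 : s = "DSNULI"; · subst h4; decide
  by_cases h5 : s = "CSQBSTUB"; · subst h5; decide
  by_cases h6 : s = "CSQBRRSI"; · subst h6; decide
  by_cases h7 : s = "CSQBRSTB"; · subst h7; decide
  by_cases h8 : s = "CSQCSTUB"; · subst h8; decide
  by_cases h9 : s = "CSQQSTUB"; · subst h9; decide
  by_cases h10 : s = "CSQXSTUB"; · subst h10; decide
  by_cases h11 : s = "CSQASTUB"; · subst h11; decide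
  have hc1 : (s == "DFHECI") = false := by simpa using h1
  have hdb2 := db2_pattern_false s h2 h3 h4
  have hwmq := wmq_pattern_false s h5 h8 h9 h10 h11 h6 h7
  have hB : determine_stubs_alt s = [("CICS", false), ("DB2", false), ("WMQ", false)] := by
    unfold determine_stubs_alt
    simp only [hc1, hdb2, hwmq]
    simp
  rw [hB]
  unfold determine_stubs
  have eA : (PySem.Dict.ofList
      [("CICS", PySem.Set.ofList ["DFHECI"]),
       ("DB2", PySem.Set.ofList ["DSNCLI", "DSNELI", "DSNULI"]),
       ("WMQ", PySem.Set.ofList ["CSQBSTUB", "CSQBRRSI", "CSQBRSTB", "CSQCSTUB",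
                                 "CSQQSTUB", "CSQXSTUB", "CSQASTUB"])] : PySem.Dict String (PySem.Set String)) =
      PySem.Dict.mk
      [("CICS", ["DFHECI"]),
       ("DB2", ["DSNCLI", "DSNELI", "DSNULI"]),
       ("WMQ", ["CSQBSTUB", "CSQBRRSI", "CSQBRSTB", "CSQCSTUB",
                "CSQQSTUB", "CSQXSTUB", "CSQASTUB"])] := by decide
  rw [eA]
  simp [PySem.Dict.getD, PySem.Dict.get?, PySem.Set.contains,
        h1, h2, h3, h4, h5, h6, h7, h8, h9, h10, h11]
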